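-- pv_equiv track=rewrite | github.com/chriskok/ThePuzzlePressTools | SolutionSpaceSolver/ham_cycle.py | producePuzzleBoard
-- ===== SOURCE A (Python) =====
-- def producePuzzleBoard(number):
--     current_board = []
--     for i in range(number):
--         current_row = []
--         for j in range(number):
--             current_number = i*number + j
--             current_row.append(current_number)
--         current_board.append(current_row)
--
--     return current_board
-- ===== SOURCE B (Python) =====
-- def producePuzzleBoard(number):
--     flat = list(range(number * number)) if number > 0 else []
--     return [flat[i*number:(i+1)*number] for i in range(number)]
-- ===== Notes on version B (the rewrite author's own statement) =====
-- stated objective: alternative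
-- what changed: B builds the whole flat sequence 0..n*n-1 in one pass and then partitions it into rows by slicing, instead of A's nested per-cell loop computing i*number+j for each cell.
import Mathlib
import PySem

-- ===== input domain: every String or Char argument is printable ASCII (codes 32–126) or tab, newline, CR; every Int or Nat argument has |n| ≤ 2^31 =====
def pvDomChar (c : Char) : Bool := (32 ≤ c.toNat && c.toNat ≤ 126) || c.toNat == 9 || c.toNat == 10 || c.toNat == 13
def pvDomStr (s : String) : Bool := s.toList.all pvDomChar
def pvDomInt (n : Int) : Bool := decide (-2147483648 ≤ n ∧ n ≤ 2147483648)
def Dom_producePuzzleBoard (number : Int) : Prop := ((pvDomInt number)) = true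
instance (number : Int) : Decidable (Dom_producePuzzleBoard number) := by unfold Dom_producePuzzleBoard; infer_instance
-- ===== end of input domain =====

-- B assembles the board by building the flat sequence once and slicing it into rows,
-- instead of A's nested per-cell arithmetic; same cost, different decomposition.

-- ===== PORT A =====
def producePuzzleBoard (number : Int) : List (List Int) :=
  (PySem.List.pyRange 0 number 1).foldl (fun current_board i =>
    current_board ++
      [(PySem.List.pyRange 0 number 1).foldl (fun current_row j =>
        current_row ++ [i * number + j]) []]) []

-- ===== PORT B =====
def producePuzzleBoard_alt (number : Int) : List (List Int) :=
  let flat := if 0 < number then PySem.List.pyRange 0 (number * number) 1 else []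
  (PySem.List.pyRange 0 number 1).map (fun i =>
    PySem.List.slice flat (some (i * number)) (some ((i + 1) * number)))

-- ===== PRECONDITION & SPEC =====
def Spec_producePuzzleBoard (number : Int) (out : List (List Int)) : Prop := out = producePuzzleBoard_alt number
instance (number : Int) (out : List (List Int)) : Decidable (Spec_producePuzzleBoard number out) := by unfold Spec_producePuzzleBoard; infer_instance

-- ===== CLAIM (what is proved, stated in full; the proofs are below) =====
def Claim_equal_producePuzzleBoard : Prop := ∀ (number : Int), Dom_producePuzzleBoard number → Spec_producePuzzleBoard number (producePuzzleBoard number)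

-- ===== LEMMAS AND PROOFS =====

-- a foldl that appends f x for each x is a map
theorem pv_foldl_append_map {α β : Type} (f : α → β) :
    ∀ (l : List α) (acc : List β),
      l.foldl (fun acc x => acc ++ [f x]) acc = acc ++ l.map f := by
  intro l
  induction l with
  | nil => simp
  | cons x xs ih => intro acc; simp [List.foldl, ih]

-- slicing a range from 0 at in-range bounds yields the sub-range
theorem pv_slice_pyRange (m a b : Int) (ha : 0 ≤ a) (hab : a ≤ b) (hbm : b ≤ m) :
    PySem.List.slice (PySem.List.pyRange 0 m 1) (some a) (some b) =
      PySem.List.pyRange a b 1 := by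
  rw [PySem.List.slice_toNat (ha := ha) (hb := le_trans ha hab)]
  apply List.ext_getElem
  · simp [PySem.List.length_pyRange_one]
    omega
  · intro k h1 h2
    have hk : a.toNat + k < (m - 0).toNat := by
      simp [PySem.List.length_pyRange_one] at h1 h2 ⊢
      omega
    simp only [List.getElem_take, List.getElem_drop]
    rw [PySem.List.getElem_pyRange_one, PySem.List.getElem_pyRange_one]
    push_cast
    omega

theorem producePuzzleBoard_eq (number : Int) :
    producePuzzleBoard number = producePuzzleBoard_alt number := by
  unfold producePuzzleBoard producePuzzleBoard_alt
  by_cases hpos : 0 < number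
  case neg =>
    rw [PySem.List.pyRange_one_eq_nil (by omega)]
    simp
  rw [if_pos hpos]
  rw [pv_foldl_append_map]
  simp only [List.nil_append]
  apply List.map_congr_left
  intro i hi
  rw [pv_foldl_append_map]
  have hmem := (PySem.List.mem_pyRange_one.mp hi)
  rw [pv_slice_pyRange (number * number) (i * number) ((i + 1) * number)
      (by nlinarith [hmem.1, hmem.2]) (by nlinarith [hmem.1, hmem.2])
      (by nlinarith [hmem.1, hmem.2])]
  rw [PySem.List.pyRange_one, PySem.List.pyRange_one]
  have hlen : (i + 1) * number - i * number = number := by ring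
  have hlen0 : number - 0 = number := by ring
  rw [hlen, hlen0]
  simp only [List.nil_append, List.map_map]
  apply List.map_congr_left
  intro k _
  simp

-- ===== VERDICT (by name: the statement is the Claim_ definition above) =====
theorem producePuzzleBoard_spec : Claim_equal_producePuzzleBoard := by
  intro number _
  exact producePuzzleBoard_eq number
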